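-- pv_equiv track=rewrite | github.com/lenameow/QT-news-momentum | 02-time-bar-processing.py | findNearestDatetime
-- ===== SOURCE A (Python) =====
-- def findNearestDatetime(base_datetime, list_datetime):
--     idx = 0
--     length_of_list_datetime = len(list_datetime)
--     while (idx < length_of_list_datetime) and (list_datetime[idx] <= base_datetime):
--         idx = idx + 1
--     if idx >= length_of_list_datetime:
--         return None
--     else:
--         return list_datetime[idx]
-- ===== SOURCE B (Python) =====
-- def findNearestDatetime(base_datetime, list_datetime):
--     ans = None
--     for x in reversed(list_datetime):
--         if x > base_datetime:
--             ans = x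
--     return ans
-- ===== Notes on version B (the rewrite author's own statement) =====
-- stated objective: alternative
-- what changed: Replaces the early-exit forward index loop with an exhaustive right-to-left fold that overwrites an accumulator with each element greater than base, so the last overwrite is the leftmost such element; equivalence is proved by showing the traversal order does not matter.
import Mathlib
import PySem

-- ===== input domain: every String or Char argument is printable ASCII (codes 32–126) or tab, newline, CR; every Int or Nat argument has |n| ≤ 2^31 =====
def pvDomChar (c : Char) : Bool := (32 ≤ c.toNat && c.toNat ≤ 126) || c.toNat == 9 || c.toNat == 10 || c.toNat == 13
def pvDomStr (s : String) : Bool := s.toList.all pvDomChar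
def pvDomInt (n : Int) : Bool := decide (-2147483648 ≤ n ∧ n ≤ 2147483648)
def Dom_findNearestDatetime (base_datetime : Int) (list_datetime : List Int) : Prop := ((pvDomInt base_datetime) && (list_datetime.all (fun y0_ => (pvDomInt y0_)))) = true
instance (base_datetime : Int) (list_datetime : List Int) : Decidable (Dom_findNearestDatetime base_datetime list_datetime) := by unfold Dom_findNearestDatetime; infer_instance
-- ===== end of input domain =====

-- Header: B replaces A's early-exit forward index loop by an exhaustive right-to-left
-- fold keeping the leftmost element greater than base as accumulator (alternative
-- decomposition, same O(n) cost); proved to return the same value on every input.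

-- ===== PORT A =====
-- the while loop, as recursion on idx with fuel = length - idx
def findNearestDatetimeLoop (base_datetime : Int) (list_datetime : List Int) (idx : Nat) (fuel : Nat) : Nat :=
  match fuel with
  | 0 => idx
  | fuel + 1 =>
    if idx < list_datetime.length && (list_datetime.getD idx 0 ≤ base_datetime) then
      findNearestDatetimeLoop base_datetime list_datetime (idx + 1) fuel
    else idx

def findNearestDatetime (base_datetime : Int) (list_datetime : List Int) : Option Int :=
  let length_of_list_datetime := list_datetime.length
  let idx := findNearestDatetimeLoop base_datetime list_datetime 0 length_of_list_datetime
  if length_of_list_datetime ≤ idx then none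
  else some (list_datetime.getD idx 0)

-- ===== PORT B =====
-- for x in reversed(list): if x > base: ans = x
def findNearestDatetime_alt (base_datetime : Int) (list_datetime : List Int) : Option Int :=
  list_datetime.reverse.foldl
    (fun ans x => if base_datetime < x then some x else ans) none

-- ===== PRECONDITION & SPEC =====
def Spec_findNearestDatetime (base_datetime : Int) (list_datetime : List Int) (out : Option Int) : Prop := out = findNearestDatetime_alt base_datetime list_datetime
instance (base_datetime : Int) (list_datetime : List Int) (out : Option Int) : Decidable (Spec_findNearestDatetime base_datetime list_datetime out) := by unfold Spec_findNearestDatetime; infer_instance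

-- ===== CLAIM (what is proved, stated in full; the proofs are below) =====
def Claim_equal_findNearestDatetime : Prop := ∀ (base_datetime : Int) (list_datetime : List Int), Dom_findNearestDatetime base_datetime list_datetime → Spec_findNearestDatetime base_datetime list_datetime (findNearestDatetime base_datetime list_datetime)

-- ===== LEMMAS AND PROOFS =====

-- A's loop result, packaged as A's final return value, is find-first-greater on the suffix
lemma loopA_find (base : Int) (l : List Int) :
    ∀ fuel idx, l.length ≤ idx + fuel →
    (if l.length ≤ findNearestDatetimeLoop base l idx fuel then none
     else some (l.getD (findNearestDatetimeLoop base l idx fuel) 0))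
      = (l.drop idx).find? (fun x => decide (base < x)) := by
  intro fuel
  induction fuel with
  | zero =>
    intro idx h
    simp only [findNearestDatetimeLoop]
    rw [List.drop_eq_nil_of_le (by omega)]
    simp; omega
  | succ fuel ih =>
    intro idx h
    simp only [findNearestDatetimeLoop]
    by_cases hlt : idx < l.length
    · have hdrop : l.drop idx = l[idx] :: l.drop (idx + 1) :=
        (List.getElem_cons_drop hlt).symm
      have hgetD : l.getD idx 0 = l[idx] := by
        simp [List.getD, List.getElem?_eq_getElem hlt]
      by_cases hle : l.getD idx 0 ≤ base
      · simp only [hlt, hle, decide_true, Bool.and_self, if_true]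
        rw [ih (idx + 1) (by omega), hdrop, List.find?_cons]
        have hfalse : (decide (base < l[idx])) = false := by
          rw [hgetD] at hle; simp; omega
        rw [hfalse]
      · simp only [hlt, hle, decide_true, decide_false, Bool.and_false]
        rw [hdrop, List.find?_cons]
        have hgt : base < l[idx] := by rw [hgetD] at hle; omega
        simp [hgt, not_le.mpr hlt, List.getD, List.getElem?_eq_getElem hlt]
    · have hcond : (decide (idx < l.length) && decide (l.getD idx 0 ≤ base)) = false := by
        simp [hlt]
      rw [hcond]
      simp only [Bool.false_eq_true, if_false]
      rw [List.drop_eq_nil_of_le (by omega)]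
      simp; omega

-- B's backward fold is find-first-greater
lemma foldB_find (base : Int) (l : List Int) :
    l.reverse.foldl (fun ans x => if base < x then some x else ans) none
      = l.find? (fun x => decide (base < x)) := by
  rw [List.foldl_reverse]
  induction l with
  | nil => simp
  | cons x xs ih =>
    rw [List.foldr_cons, List.find?_cons, ih]
    by_cases h : base < x <;> simp [h]

-- ===== VERDICT (by name: the statement is the Claim_ definition above) =====
theorem findNearestDatetime_spec : Claim_equal_findNearestDatetime := by
  intro base l _
  unfold Spec_findNearestDatetime findNearestDatetime findNearestDatetime_alt
  simp only
  have := loopA_find base l l.length 0 (by omega)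
  rw [List.drop_zero] at this
  rw [foldB_find, ← this]
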